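-- pv_equiv track=rewrite | github.com/rylinjames/easyinference | products/inferscope/src/inferscope/benchmarks/procedural.py | _shape_context
-- ===== SOURCE A (Python) =====
-- import math
--
-- def _approx_tokens(text: str) -> int:
--     return max(1, math.ceil(len(text) / 4))
--
-- def _shape_context(blocks: list[str], target_tokens: int | None) -> str:
--     if not blocks:
--         return ""
--     if target_tokens is None:
--         return "\n\n".join(blocks)
--     target = max(1, target_tokens)
--     parts: list[str] = []
--     total = 0
--     index = 0
--     while total < target:
--         block = blocks[index % len(blocks)]
--         parts.append(block)
--         total += _approx_tokens(block)
--         index += 1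
--     return "\n\n".join(parts)
-- ===== SOURCE B (Python) =====
-- import math
--
--
-- def _approx_tokens(text: str) -> int:
--     return max(1, math.ceil(len(text) / 4))
--
--
-- def _shape_context(blocks: list[str], target_tokens: int | None) -> str:
--     if not blocks:
--         return ""
--     if target_tokens is None:
--         return "\n\n".join(blocks)
--     target = max(1, target_tokens)
--     toks = [_approx_tokens(b) for b in blocks]
--     cycle = sum(toks)
--     # number of whole cycles that stay strictly below target
--     k = (target - 1) // cycle
--     parts = blocks * k
--     total = k * cycle
--     for block, t in zip(blocks, toks):
--         if total >= target:
--             break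
--         parts.append(block)
--         total += t
--     return "\n\n".join(parts)
-- ===== Notes on version B (the rewrite author's own statement) =====
-- stated objective: alternative
-- what changed: Replaces the one-at-a-time cyclic while-loop with a closed form: the per-cycle token sum is computed once, the number of full cycles k = (target-1)//cycle is emitted by list repetition, and a single bounded tail pass over blocks finishes the job (join time over the same output dominates, so overall cost is unchanged).
import Mathlib
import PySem

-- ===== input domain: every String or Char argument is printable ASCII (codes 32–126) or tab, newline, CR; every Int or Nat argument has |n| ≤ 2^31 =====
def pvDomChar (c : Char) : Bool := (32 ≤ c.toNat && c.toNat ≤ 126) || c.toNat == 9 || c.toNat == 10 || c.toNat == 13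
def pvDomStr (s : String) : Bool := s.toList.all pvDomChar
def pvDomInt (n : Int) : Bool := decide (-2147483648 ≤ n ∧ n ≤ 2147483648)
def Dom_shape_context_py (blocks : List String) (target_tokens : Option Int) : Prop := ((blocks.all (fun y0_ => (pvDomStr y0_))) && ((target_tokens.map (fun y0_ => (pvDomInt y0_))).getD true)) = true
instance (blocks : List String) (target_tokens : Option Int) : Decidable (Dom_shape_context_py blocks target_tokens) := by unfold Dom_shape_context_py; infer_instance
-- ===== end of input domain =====

-- B replaces A's one-block-at-a-time cyclic while-loop by a closed-form count of full
-- cycles (emitted with list repetition) plus one bounded tail pass; return values are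
-- proved identical on every input.

-- ===== PORT A =====
-- math.ceil(len(text)/4): len/4 is exact in binary floating point, so ceil(len/4) = (len+3)//4 exactly.
def approx_tokens (text : String) : Int :=
  max 1 (PySem.Int.floordiv ((PySem.Str.len text : Int) + 3) 4)

-- tokens are always ≥ 1 (used for the loop's termination)
theorem approx_tokens_pos (text : String) : 1 ≤ approx_tokens text := le_max_left _ _

-- the while-loop of A; index stays ≥ 0 so Python's blocks[index % len(blocks)] is plain
-- in-range indexing (getD's default "" is unreachable for nonempty blocks)
def shapeLoopA (blocks : List String) (target : Int)
    (parts : List String) (total : Int) (index : Nat) : List String :=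
  if _h : total < target then
    let block := blocks.getD (index % blocks.length) ""
    shapeLoopA blocks target (parts ++ [block]) (total + approx_tokens block) (index + 1)
  else parts
termination_by (target - total).toNat
decreasing_by
  have := approx_tokens_pos (blocks.getD (index % blocks.length) "")
  omega

def shape_context_py (blocks : List String) (target_tokens : Option Int) : String :=
  if blocks = [] then "" else
  match target_tokens with
  | none => PySem.Str.join "\n\n" blocks
  | some t =>
    let target := max 1 t
    PySem.Str.join "\n\n" (shapeLoopA blocks target [] 0 0)

-- ===== PORT B =====
-- the bounded tail for-loop of B (returns the blocks it appends)
def shapeTailB (target : Int) : List (String × Int) → Int → List String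
  | [], _ => []
  | (b, t) :: rest, total =>
    if total ≥ target then [] else b :: shapeTailB target rest (total + t)

def shape_context_py_alt (blocks : List String) (target_tokens : Option Int) : String :=
  if blocks = [] then "" else
  match target_tokens with
  | none => PySem.Str.join "\n\n" blocks
  | some tt =>
    let target := max 1 tt
    let toks := blocks.map approx_tokens
    let cycle := toks.sum
    let k := PySem.Int.floordiv (target - 1) cycle
    -- Python's blocks * k; k ≥ 0 here since target ≥ 1 and cycle ≥ 1
    let parts := (List.replicate k.toNat blocks).flatten
    let total := k * cycle
    PySem.Str.join "\n\n" (parts ++ shapeTailB target (blocks.zip toks) total)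

-- ===== PRECONDITION & SPEC =====
def Spec_shape_context_py (blocks : List String) (target_tokens : Option Int) (out : String) : Prop := out = shape_context_py_alt blocks target_tokens
instance (blocks : List String) (target_tokens : Option Int) (out : String) : Decidable (Spec_shape_context_py blocks target_tokens out) := by unfold Spec_shape_context_py; infer_instance

-- ===== CLAIM (what is proved, stated in full; the proofs are below) =====
def Claim_equal_shape_context_py : Prop := ∀ (blocks : List String) (target_tokens : Option Int), Dom_shape_context_py blocks target_tokens → Spec_shape_context_py blocks target_tokens (shape_context_py blocks target_tokens)

-- ===== LEMMAS AND PROOFS =====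

-- the sum of a block list's tokens is at least its length (each token ≥ 1)
theorem sumTok_ge_length (l : List String) :
    (l.length : Int) ≤ (l.map approx_tokens).sum := by
  induction l with
  | nil => simp
  | cons b rest ih =>
    have := approx_tokens_pos b
    simp only [List.map_cons, List.sum_cons, List.length_cons]
    push_cast
    omega

theorem sumTok_nonneg (l : List String) : 0 ≤ (l.map approx_tokens).sum := by
  have := sumTok_ge_length l
  omega

-- one contiguous run of A's loop: as long as the remaining suffix's tokens still fit
-- under target, the loop appends exactly that suffix
theorem shapeLoopA_run (blocks : List String) (target : Int) :
    ∀ (l : List String) (j : Nat) (parts : List String) (total : Int) (index : Nat),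
    (l ≠ [] → blocks.drop j = l ∧ index % blocks.length = j) →
    total + (l.map approx_tokens).sum ≤ target →
    shapeLoopA blocks target parts total index
      = shapeLoopA blocks target (parts ++ l) (total + (l.map approx_tokens).sum) (index + l.length) := by
  intro l
  induction l with
  | nil => intro j parts total index _ _; simp
  | cons b rest ih =>
    intro j parts total index h hle
    obtain ⟨hdrop, hmod⟩ := h (by simp)
    have hrest_nonneg := sumTok_nonneg rest
    have hb := approx_tokens_pos b
    have hsum : ((b :: rest).map approx_tokens).sum = approx_tokens b + (rest.map approx_tokens).sum := by simp
    have hlt : total < target := by rw [hsum] at hle; omega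
    have hjlt : j < blocks.length := by
      by_contra hge
      have : blocks.drop j = [] := List.drop_eq_nil_of_le (by omega)
      rw [hdrop] at this; exact (List.cons_ne_nil _ _) this
    have hget : blocks.getD (index % blocks.length) "" = b := by
      rw [hmod]
      have h0 : blocks[j]? = some b := by
        have h1 : (List.drop j blocks)[0]? = blocks[j + 0]? := List.getElem?_drop
        rw [hdrop] at h1
        simpa using h1.symm
      simp [List.getD, h0]
    rw [shapeLoopA, dif_pos hlt, hget]
    rcases rest with _ | ⟨b2, rest2⟩
    · simp
    · have hIH := ih (j + 1) (parts ++ [b]) (total + approx_tokens b) (index + 1)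
        (by
          intro _
          constructor
          · have : blocks.drop (j + 1) = (blocks.drop j).tail := by
              rw [List.tail_drop]
            rw [this, hdrop]; rfl
          · have hj1 : j + 1 < blocks.length := by
              by_contra hge
              have : blocks.drop (j+1) = [] := List.drop_eq_nil_of_le (by omega)
              have ht : blocks.drop (j + 1) = (blocks.drop j).tail := by rw [List.tail_drop]
              rw [ht, hdrop] at this
              exact (List.cons_ne_nil _ _) this
            rw [Nat.add_mod, hmod, Nat.one_mod_eq_one.mpr (by omega), Nat.mod_eq_of_lt (by omega)])
        (by rw [hsum] at hle; omega)
      have e1 : parts ++ [b] ++ b2 :: rest2 = parts ++ b :: b2 :: rest2 := by simp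
      have e2 : total + approx_tokens b + ((b2 :: rest2).map approx_tokens).sum
          = total + ((b :: b2 :: rest2).map approx_tokens).sum := by rw [hsum]; ring
      have e3 : index + 1 + (b2 :: rest2).length = index + (b :: b2 :: rest2).length := by
        simp only [List.length_cons]; omega
      rw [hIH, e1, e2, e3]

-- k full cycles of A's loop append k copies of blocks, as long as k*cycle ≤ target
theorem shapeLoopA_cycles (blocks : List String) (target : Int) (hne : blocks ≠ []) :
    ∀ (k : Nat) (parts : List String) (total : Int) (index : Nat),
    index % blocks.length = 0 →
    total + (k : Int) * (blocks.map approx_tokens).sum ≤ target →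
    shapeLoopA blocks target parts total index
      = shapeLoopA blocks target (parts ++ (List.replicate k blocks).flatten)
          (total + (k : Int) * (blocks.map approx_tokens).sum) (index + k * blocks.length) := by
  intro k
  induction k with
  | zero => intro parts total index _ _; simp
  | succ k ih =>
    intro parts total index hmod hle
    have hS := sumTok_ge_length blocks
    have hlen : 1 ≤ (blocks.length : Int) := by
      have := List.length_pos_of_ne_nil hne
      omega
    have hknn : (0:Int) ≤ (k : Int) * (blocks.map approx_tokens).sum := by
      have := sumTok_nonneg blocks; positivity
    have hstep := shapeLoopA_run blocks target blocks 0 parts total index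
      (fun _ => ⟨by simp, hmod⟩)
      (by push_cast at hle ⊢; nlinarith [sumTok_nonneg blocks])
    rw [hstep]
    have hIH := ih (parts ++ blocks) (total + (blocks.map approx_tokens).sum)
      (index + blocks.length)
      (by simp [hmod])
      (by push_cast at hle ⊢; nlinarith)
    rw [hIH]
    congr 1
    · simp [List.replicate_succ]
    · push_cast; ring
    · ring_nf

-- once the remaining suffix's tokens reach target, A's loop and B's tail agree
theorem shapeLoopA_tail (blocks : List String) (target : Int) :
    ∀ (l : List (String × Int)) (j : Nat) (parts : List String) (total : Int) (index : Nat),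
    (l ≠ [] → (blocks.zip (blocks.map approx_tokens)).drop j = l ∧ index % blocks.length = j) →
    target ≤ total + (l.map Prod.snd).sum →
    shapeLoopA blocks target parts total index = parts ++ shapeTailB target l total := by
  intro l
  induction l with
  | nil =>
    intro j parts total index _ hge
    simp only [List.map_nil, List.sum_nil, add_zero] at hge
    rw [shapeLoopA, dif_neg (by omega), shapeTailB]
    simp
  | cons bt rest ih =>
    intro j parts total index h hge
    obtain ⟨b, t⟩ := bt
    obtain ⟨hdrop, hmod⟩ := h (by simp)
    by_cases hlt : total < target
    · have hzip : (blocks.zip (blocks.map approx_tokens))[j]? = some (b, t) := by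
        have h1 : (List.drop j (blocks.zip (blocks.map approx_tokens)))[0]?
            = (blocks.zip (blocks.map approx_tokens))[j + 0]? := List.getElem?_drop
        rw [hdrop] at h1
        simpa using h1.symm
      have hjlt : j < (blocks.zip (blocks.map approx_tokens)).length :=
        List.getElem?_eq_some_iff.mp hzip |>.1
      have hjb : j < blocks.length := by
        simpa [List.length_zip] using hjlt
      have hbj : blocks[j]? = some b ∧ (blocks.map approx_tokens)[j]? = some t := by
        have h1 := List.getElem?_zip_eq_some.mp (by simpa using hzip)
        exact h1
      have hget : blocks.getD (index % blocks.length) "" = b := by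
        rw [hmod]; simp [List.getD, hbj.1]
      have ht : t = approx_tokens b := by
        have h2 := hbj.2
        have h3 : (blocks.map approx_tokens)[j]? = some (approx_tokens b) := by
          rw [List.getElem?_map, hbj.1]; rfl
        rw [h3] at h2; exact (Option.some_inj.mp h2).symm
      rw [shapeLoopA, dif_pos hlt, hget, shapeTailB, if_neg (by omega)]
      have hIH := ih (j + 1) (parts ++ [b]) (total + t) (index + 1)
        (by
          intro hr
          constructor
          · have : (blocks.zip (blocks.map approx_tokens)).drop (j + 1)
                = ((blocks.zip (blocks.map approx_tokens)).drop j).tail := by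
              rw [List.tail_drop]
            rw [this, hdrop]; rfl
          · have hj1 : j + 1 < (blocks.zip (blocks.map approx_tokens)).length := by
              by_contra hge2
              have he : (blocks.zip (blocks.map approx_tokens)).drop (j+1) = [] :=
                List.drop_eq_nil_of_le (by omega)
              have ht2 : (blocks.zip (blocks.map approx_tokens)).drop (j + 1)
                  = ((blocks.zip (blocks.map approx_tokens)).drop j).tail := by rw [List.tail_drop]
              rw [ht2, hdrop] at he
              exact hr he
            have hjb1 : j + 1 < blocks.length := by simpa [List.length_zip] using hj1
            rw [Nat.add_mod, hmod, Nat.one_mod_eq_one.mpr (by omega), Nat.mod_eq_of_lt (by omega)])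
        (by simp only [List.map_cons, List.sum_cons] at hge; omega)
      rw [ht] at hIH ⊢
      rw [hIH]
      simp
    · rw [shapeLoopA, dif_neg hlt, shapeTailB, if_pos (by omega)]
      simp

-- snd-sum of zip with the token map is the token sum
theorem sumSnd_zip (blocks : List String) :
    ((blocks.zip (blocks.map approx_tokens)).map Prod.snd).sum = (blocks.map approx_tokens).sum := by
  induction blocks with
  | nil => rfl
  | cons b rest ih => simp [List.zip_cons_cons, ih]

-- ===== VERDICT (by name: the statement is the Claim_ definition above) =====
theorem shape_context_py_spec : Claim_equal_shape_context_py := by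
  intro blocks target_tokens _
  unfold Spec_shape_context_py shape_context_py shape_context_py_alt
  by_cases hne : blocks = []
  · simp [hne]
  · rw [if_neg hne, if_neg hne]
    cases target_tokens with
    | none => rfl
    | some tt =>
      simp only
      set target : Int := max 1 tt with htarget
      have htpos : 1 ≤ target := le_max_left _ _
      set S : Int := (blocks.map approx_tokens).sum with hS
      have hSpos : 1 ≤ S := by
        have h1 := sumTok_ge_length blocks
        have := List.length_pos_of_ne_nil hne
        omega
      set k : Int := PySem.Int.floordiv (target - 1) S with hk
      have hkdiv : k = (target - 1) / S := by
        rw [hk, PySem.Int.floordiv_eq_ediv_of_pos (by omega)]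
      have hkS : k * S ≤ target - 1 ∧ target - 1 < (k + 1) * S := by
        have hdm := Int.mul_ediv_add_emod (target - 1) S
        have hm0 := Int.emod_nonneg (target - 1) (by omega : S ≠ 0)
        have hm1 := Int.emod_lt_of_pos (target - 1) (by omega : (0:Int) < S)
        constructor <;> [nlinarith [hkdiv]; nlinarith [hkdiv]]
      have hknn : 0 ≤ k := by
        rw [hkdiv]
        exact Int.ediv_nonneg (by omega) (by omega)
      have hkcast : (k.toNat : Int) = k := Int.toNat_of_nonneg hknn
      have hcycles := shapeLoopA_cycles blocks target hne k.toNat [] 0 0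
        (by simp) (by rw [hkcast, ← hS]; omega)
      have htail := shapeLoopA_tail blocks target (blocks.zip (blocks.map approx_tokens)) 0
        ((List.replicate k.toNat blocks).flatten) ((k.toNat : Int) * S)
        (k.toNat * blocks.length)
        (by
          intro _
          exact ⟨by simp, by simp [Nat.mul_mod_left]⟩)
        (by
          rw [sumSnd_zip, ← hS, hkcast]
          nlinarith [hkS.2])
      simp only [List.nil_append, zero_add, ← hS] at hcycles
      rw [hcycles, htail, hkcast]
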